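-- pv_equiv track=rewrite | github.com/JunlinLiu2000/CSCI544-NLP | HW4/perceplearn.py | PerceptronTrain
-- ===== SOURCE A (Python) =====
-- def PerceptronTrain(word_set, dict_list,True_Fake_list, Pos_Neg_list):
--     TF_weight_dic = {}
--     PN_weight_dic = {}
--     for word in word_set:
--         TF_weight_dic[word] = 0
--         PN_weight_dic[word] = 0
--
--     b_TF = 0
--     b_PN = 0
--     for iter in range(10):
--         for i in range(len(dict_list)):
--             a_TF = 0
--             a_PN = 0
--             dict = dict_list[i]
--             for key, value in dict.items():
--                 a_TF += TF_weight_dic[key]*value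
--                 a_PN += PN_weight_dic[key]*value
--             a_TF = a_TF + b_TF
--             a_PN = a_PN + b_PN
--             if a_TF * True_Fake_list[i] <= 0:
--                 for key, value in dict.items():
--                     TF_weight_dic[key] = TF_weight_dic[key] + True_Fake_list[i]*value
--                 b_TF = b_TF + True_Fake_list[i]
--
--             if a_PN * Pos_Neg_list[i] <= 0:
--                 for key, value in dict.items():
--                     PN_weight_dic[key] = PN_weight_dic[key] + Pos_Neg_list[i]*value
--                 b_PN = b_PN + Pos_Neg_list[i]
--
--     return TF_weight_dic, b_TF, PN_weight_dic, b_PN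
-- ===== SOURCE B (Python) =====
-- def train_one(word_set, dict_list, label_list):
--     # one independent binary perceptron: 10 epochs over (features, label) pairs
--     w = dict.fromkeys(word_set, 0)
--     b = 0
--     for _ in range(10):
--         for feats, y in zip(dict_list, label_list):
--             a = sum(w[k] * v for k, v in feats.items()) + b
--             if a * y <= 0:
--                 for k, v in feats.items():
--                     w[k] += y * v
--                 b += y
--     return w, b
--
--
-- def PerceptronTrain(word_set, dict_list, True_Fake_list, Pos_Neg_list):
--     TF_weights, b_TF = train_one(word_set, dict_list, True_Fake_list)
--     PN_weights, b_PN = train_one(word_set, dict_list, Pos_Neg_list)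
--     return TF_weights, b_TF, PN_weights, b_PN
-- ===== Notes on version B (the rewrite author's own statement) =====
-- stated objective: simpler
-- what changed: Factors a single-perceptron trainer train_one(word_set, dict_list, label_list) returning (weights, bias) and calls it once per label list, replacing A's single interleaved loop that threads both perceptrons' 4-part state; since the two perceptrons share no state the results are identical.
import Mathlib
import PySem

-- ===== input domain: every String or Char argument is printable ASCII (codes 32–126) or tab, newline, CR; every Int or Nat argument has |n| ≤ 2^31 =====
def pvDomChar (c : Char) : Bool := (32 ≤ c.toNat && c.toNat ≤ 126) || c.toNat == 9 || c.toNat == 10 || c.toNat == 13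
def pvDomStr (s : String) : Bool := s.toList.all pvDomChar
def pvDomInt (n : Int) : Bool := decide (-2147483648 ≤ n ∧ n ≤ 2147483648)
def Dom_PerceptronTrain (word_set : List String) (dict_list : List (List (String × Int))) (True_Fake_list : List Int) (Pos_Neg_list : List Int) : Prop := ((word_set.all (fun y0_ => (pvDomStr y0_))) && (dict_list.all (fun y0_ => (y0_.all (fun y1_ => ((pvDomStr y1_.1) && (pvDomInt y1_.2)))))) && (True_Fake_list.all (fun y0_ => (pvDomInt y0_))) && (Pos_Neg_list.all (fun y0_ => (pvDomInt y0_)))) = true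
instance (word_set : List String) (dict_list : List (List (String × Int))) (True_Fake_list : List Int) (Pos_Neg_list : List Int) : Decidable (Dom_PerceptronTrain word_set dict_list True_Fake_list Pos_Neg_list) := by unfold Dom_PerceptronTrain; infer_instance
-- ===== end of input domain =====

-- B replaces A's single interleaved training loop over the two perceptrons by a factored
-- single-perceptron trainer called once per label list (objective: simpler decomposition;
-- the two perceptrons share no state, so the results coincide).

-- ===== PORT A =====
-- A-side helper: the running sparse dot product a += w[key]*value (w[key]: KeyError outside Pre_)
def pvADot (w : PySem.Dict String Int) (d : List (String × Int)) : Int :=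
  d.foldl (fun a kv => a + w.getD kv.1 0 * kv.2) 0

-- A-side helper: the update loop w[key] = w[key] + y*value over dict.items()
def pvAUpd (y : Int) (w : PySem.Dict String Int) (d : List (String × Int)) : PySem.Dict String Int :=
  d.foldl (fun w kv => w.insert kv.1 (w.getD kv.1 0 + y * kv.2)) w

-- A-side helper: the inner for-i loop over range(len(dict_list)); state ((TF_weight_dic, b_TF), (PN_weight_dic, b_PN))
def pvAInner (dict_list : List (List (String × Int))) (True_Fake_list Pos_Neg_list : List Int)
    (st : (PySem.Dict String Int × Int) × (PySem.Dict String Int × Int)) :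
    (PySem.Dict String Int × Int) × (PySem.Dict String Int × Int) :=
  (List.range dict_list.length).foldl (fun st i =>
    let d := dict_list.getD i []                 -- dict_list[i], always in range
    let yTF := True_Fake_list.getD i 0           -- True_Fake_list[i]: IndexError outside Pre_
    let yPN := Pos_Neg_list.getD i 0             -- Pos_Neg_list[i]: IndexError outside Pre_
    let aTF := pvADot st.1.1 d + st.1.2
    let aPN := pvADot st.2.1 d + st.2.2
    let s1 := if aTF * yTF ≤ 0 then (pvAUpd yTF st.1.1 d, st.1.2 + yTF) else st.1
    let s2 := if aPN * yPN ≤ 0 then (pvAUpd yPN st.2.1 d, st.2.2 + yPN) else st.2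
    (s1, s2)) st

def PerceptronTrain (word_set : List String) (dict_list : List (List (String × Int))) (True_Fake_list : List Int) (Pos_Neg_list : List Int) : (List (String × Int)) × Int × (List (String × Int)) × Int :=
  -- one loop over word_set filling both weight dicts with 0
  let init := word_set.foldl (fun p w => (p.1.insert w 0, p.2.insert w 0))
      ((PySem.Dict.empty : PySem.Dict String Int), (PySem.Dict.empty : PySem.Dict String Int))
  let st := (List.range 10).foldl (fun st _ => pvAInner dict_list True_Fake_list Pos_Neg_list st)
    ((init.1, 0), (init.2, 0))
  (st.1.1.items, st.1.2, st.2.1.items, st.2.2)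

-- ===== PORT B =====
-- B-side helper: train one perceptron (weights, bias) on (features, label) pairs, 10 epochs
def pvTrainOne (word_set : List String) (dict_list : List (List (String × Int))) (label_list : List Int) : PySem.Dict String Int × Int :=
  let w0 := word_set.foldl (fun w k => w.insert k 0) (PySem.Dict.empty : PySem.Dict String Int)
  (List.range 10).foldl (fun wb _ =>
      (dict_list.zip label_list).foldl (fun wb p =>
        let a := (p.1.map (fun kv => wb.1.getD kv.1 0 * kv.2)).sum + wb.2   -- sum(w[k]*v …): KeyError outside Pre_
        if a * p.2 ≤ 0 then
          (p.1.foldl (fun w kv => w.insert kv.1 (w.getD kv.1 0 + p.2 * kv.2)) wb.1, wb.2 + p.2)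
        else wb) wb)
    (w0, 0)

def PerceptronTrain_alt (word_set : List String) (dict_list : List (List (String × Int))) (True_Fake_list : List Int) (Pos_Neg_list : List Int) : (List (String × Int)) × Int × (List (String × Int)) × Int :=
  let tf := pvTrainOne word_set dict_list True_Fake_list
  let pn := pvTrainOne word_set dict_list Pos_Neg_list
  (tf.1.items, tf.2, pn.1.items, pn.2)

-- ===== PRECONDITION & SPEC =====
-- Pre_ excludes exactly the inputs where Python A raises: an index i < len(dict_list) beyond one of
-- the label lists (IndexError) or a feature key not in word_set (KeyError on the weight dicts).
def Pre_PerceptronTrain (word_set : List String) (dict_list : List (List (String × Int))) (True_Fake_list : List Int) (Pos_Neg_list : List Int) : Prop :=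
  dict_list.length ≤ True_Fake_list.length ∧ dict_list.length ≤ Pos_Neg_list.length ∧
  ∀ d ∈ dict_list, ∀ kv ∈ d, kv.1 ∈ word_set
instance (word_set : List String) (dict_list : List (List (String × Int))) (True_Fake_list : List Int) (Pos_Neg_list : List Int) : Decidable (Pre_PerceptronTrain word_set dict_list True_Fake_list Pos_Neg_list) := by unfold Pre_PerceptronTrain; infer_instance

def pvWitness_PerceptronTrain : List String × (List (List (String × Int))) × List Int × List Int :=
  (["good", "bad"], [[("good", 2)], [("bad", 1), ("good", 1)]], [1, -1], [-1, 1])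

def Spec_PerceptronTrain (word_set : List String) (dict_list : List (List (String × Int))) (True_Fake_list : List Int) (Pos_Neg_list : List Int) (out : (List (String × Int)) × Int × (List (String × Int)) × Int) : Prop := out = PerceptronTrain_alt word_set dict_list True_Fake_list Pos_Neg_list
instance (word_set : List String) (dict_list : List (List (String × Int))) (True_Fake_list : List Int) (Pos_Neg_list : List Int) (out : (List (String × Int)) × Int × (List (String × Int)) × Int) : Decidable (Spec_PerceptronTrain word_set dict_list True_Fake_list Pos_Neg_list out) := by unfold Spec_PerceptronTrain; infer_instance

-- ===== CLAIM (what is proved, stated in full; the proofs are below) =====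
def Claim_equal_PerceptronTrain : Prop := ∀ (word_set : List String) (dict_list : List (List (String × Int))) (True_Fake_list : List Int) (Pos_Neg_list : List Int), Dom_PerceptronTrain word_set dict_list True_Fake_list Pos_Neg_list → Pre_PerceptronTrain word_set dict_list True_Fake_list Pos_Neg_list → Spec_PerceptronTrain word_set dict_list True_Fake_list Pos_Neg_list (PerceptronTrain word_set dict_list True_Fake_list Pos_Neg_list)

-- ===== LEMMAS AND PROOFS =====

-- B's sum over the mapped products equals A's running accumulation of the dot product
theorem pvDot_eq (w : PySem.Dict String Int) (d : List (String × Int)) :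
    (d.map (fun kv => w.getD kv.1 0 * kv.2)).sum = pvADot w d := by
  rw [List.sum_eq_foldl, List.foldl_map]; rfl

-- B's per-example step, named for the induction
def pvBStep (wb : PySem.Dict String Int × Int) (p : List (String × Int) × Int) : PySem.Dict String Int × Int :=
  let a := (p.1.map (fun kv => wb.1.getD kv.1 0 * kv.2)).sum + wb.2
  if a * p.2 ≤ 0 then
    (p.1.foldl (fun w kv => w.insert kv.1 (w.getD kv.1 0 + p.2 * kv.2)) wb.1, wb.2 + p.2)
  else wb

-- A's interleaved inner pass over indices = B's two zip passes, when both label lists cover dict_list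
theorem pvInner_split (ds : List (List (String × Int))) (tf pn : List Int)
    (h1 : ds.length ≤ tf.length) (h2 : ds.length ≤ pn.length)
    (s : (PySem.Dict String Int × Int) × (PySem.Dict String Int × Int)) :
    pvAInner ds tf pn s = ((ds.zip tf).foldl pvBStep s.1, (ds.zip pn).foldl pvBStep s.2) := by
  induction ds generalizing tf pn s with
  | nil => rfl
  | cons d ds ih =>
    match tf, pn with
    | y :: tf', z :: pn' =>
      simp only [pvAInner, List.length_cons, List.range_succ_eq_map, List.foldl_cons,
        List.foldl_map, List.getD_cons_succ, List.getD_cons_zero, List.zip_cons_cons] at *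
      rw [ih tf' pn' (by simpa using h1) (by simpa using h2)]
      congr 1 <;> simp [pvBStep, pvAUpd, pvDot_eq]

-- ===== VERDICT (by name: the statement is the Claim_ definition above) =====
theorem PerceptronTrain_spec : Claim_equal_PerceptronTrain := by
  intro ws dl tf pn _ hpre
  obtain ⟨h1, h2, -⟩ := hpre
  simp only [Spec_PerceptronTrain, PerceptronTrain, PerceptronTrain_alt, pvTrainOne]
  rw [PySem.List.foldl_prod_mk (f := fun (w : PySem.Dict String Int) k => w.insert k 0)
      (g := fun (w : PySem.Dict String Int) k => w.insert k 0)]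
  have h : (fun (st : (PySem.Dict String Int × Int) × (PySem.Dict String Int × Int)) (_ : Nat) =>
        pvAInner dl tf pn st)
      = fun st _ => ((dl.zip tf).foldl pvBStep st.1, (dl.zip pn).foldl pvBStep st.2) := by
    funext st i; exact pvInner_split dl tf pn h1 h2 st
  rw [h, PySem.List.foldl_prod_mk (f := fun a _ => (dl.zip tf).foldl pvBStep a)
      (g := fun b _ => (dl.zip pn).foldl pvBStep b)]
  rfl
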